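-- pv_equiv track=rewrite | github.com/lei-nlp-lab/logical_subspace_acl_2026 | proofwriter/data_processing/proof_to_text.py | _tokenize_at_depth_0
-- ===== SOURCE A (Python) =====
-- from typing import Dict, List, Tuple, Any
--
-- def _tokenize_at_depth_0(s: str) -> List[str]:
--     """Tokenize string by spaces at depth 0, respecting parentheses."""
--     tokens = []
--     current = ""
--     depth = 0
--
--     for char in s:
--         if char == '(':
--             depth += 1
--             current += char
--         elif char == ')':
--             depth -= 1
--             current += char
--         elif char == ' ' and depth == 0:
--             if current.strip():
--                 tokens.append(current.strip())
--             current = ""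
--         else:
--             current += char
--
--     if current.strip():
--         tokens.append(current.strip())
--
--     return tokens
-- ===== SOURCE B (Python) =====
-- from typing import List
--
-- def _tokenize_at_depth_0(s: str) -> List[str]:
--     """Tokenize string by spaces at depth 0, respecting parentheses."""
--     depth = 0
--     bounds = []
--     for i, ch in enumerate(s):
--         if ch == '(':
--             depth += 1
--         elif ch == ')':
--             depth -= 1
--         elif ch == ' ' and depth == 0:
--             bounds.append(i)
--     segs = []
--     prev = 0
--     for b in bounds + [len(s)]:
--         segs.append(s[prev:b])
--         prev = b + 1
--     return [t for t in (seg.strip() for seg in segs) if t]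
-- ===== Notes on version B (the rewrite author's own statement) =====
-- stated objective: alternative
-- what changed: Replaces A's single pass with a char-by-char token buffer by a two-pass scheme: first collect the indices of depth-0 spaces, then slice the string at those boundaries and strip/filter the segments in a comprehension.
import Mathlib
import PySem

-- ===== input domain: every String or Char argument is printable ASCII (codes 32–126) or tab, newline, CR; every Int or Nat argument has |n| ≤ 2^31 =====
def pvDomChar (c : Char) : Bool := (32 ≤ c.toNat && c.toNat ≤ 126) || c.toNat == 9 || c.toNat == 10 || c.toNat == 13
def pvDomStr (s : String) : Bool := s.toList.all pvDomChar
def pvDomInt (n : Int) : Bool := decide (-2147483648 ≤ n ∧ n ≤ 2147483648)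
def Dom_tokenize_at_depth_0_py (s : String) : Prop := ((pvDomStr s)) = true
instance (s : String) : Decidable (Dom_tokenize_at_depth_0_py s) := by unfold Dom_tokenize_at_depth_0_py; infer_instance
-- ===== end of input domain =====

-- B replaces A's char-by-char token buffer with a two-pass scheme (collect depth-0 space
-- indices, then slice the string at those boundaries); objective: alternative decomposition.

-- ===== PORT A =====
-- one loop step of A: state = (tokens, current, depth)
def tokAStep (st : List String × List Char × Int) (c : Char) : List String × List Char × Int :=
  let tokens := st.1; let current := st.2.1; let depth := st.2.2
  if c = '(' then (tokens, current ++ [c], depth + 1)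
  else if c = ')' then (tokens, current ++ [c], depth - 1)
  else if c = ' ' ∧ depth = 0 then
    ((if PySem.Chars.strip current ≠ [] then tokens ++ [String.ofList (PySem.Chars.strip current)] else tokens), [], depth)
  else (tokens, current ++ [c], depth)

def tokenize_at_depth_0_py (s : String) : List String :=
  let st := s.toList.foldl tokAStep ([], [], 0)
  if PySem.Chars.strip st.2.1 ≠ [] then st.1 ++ [String.ofList (PySem.Chars.strip st.2.1)] else st.1

-- ===== PORT B =====
-- pass 1 step of B: state = (depth, bounds)
def bStep (st : Int × List Int) (p : Int × Char) : Int × List Int :=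
  if p.2 = '(' then (st.1 + 1, st.2)
  else if p.2 = ')' then (st.1 - 1, st.2)
  else if p.2 = ' ' ∧ st.1 = 0 then (st.1, st.2 ++ [p.1])
  else (st.1, st.2)

-- pass 2 step of B: state = (segs, prev)
def sStep (full : List Char) (st : List (List Char) × Int) (b : Int) : List (List Char) × Int :=
  (st.1 ++ [PySem.List.slice full (some st.2) (some b)], b + 1)

def tokenize_at_depth_0_py_alt (s : String) : List String :=
  let bounds := ((PySem.List.enumerate s.toList 0).foldl bStep (0, [])).2
  let segs := ((bounds ++ [(s.toList.length : Int)]).foldl (sStep s.toList) ([], 0)).1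
  ((segs.map PySem.Chars.strip).filter (fun t => t ≠ [])).map String.ofList

-- ===== PRECONDITION & SPEC =====
def Spec_tokenize_at_depth_0_py (s : String) (out : List String) : Prop := out = tokenize_at_depth_0_py_alt s
instance (s : String) (out : List String) : Decidable (Spec_tokenize_at_depth_0_py s out) := by unfold Spec_tokenize_at_depth_0_py; infer_instance

-- ===== CLAIM (what is proved, stated in full; the proofs are below) =====
def Claim_equal_tokenize_at_depth_0_py : Prop := ∀ (s : String), Dom_tokenize_at_depth_0_py s → Spec_tokenize_at_depth_0_py s (tokenize_at_depth_0_py s)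

-- ===== LEMMAS AND PROOFS =====

-- common reference: split a char list into raw segments at depth-0 spaces
def consHead (c : Char) : List (List Char) → List (List Char)
  | [] => [[c]]
  | h :: t => (c :: h) :: t

def rawSplit (d : Int) : List Char → List (List Char)
  | [] => [[]]
  | c :: cs =>
    if c = '(' then consHead c (rawSplit (d + 1) cs)
    else if c = ')' then consHead c (rawSplit (d - 1) cs)
    else if c = ' ' ∧ d = 0 then [] :: rawSplit d cs
    else consHead c (rawSplit d cs)

def emit (segs : List (List Char)) : List String :=
  ((segs.map PySem.Chars.strip).filter (fun t => t ≠ [])).map String.ofList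

def prependHead (cur : List Char) : List (List Char) → List (List Char)
  | [] => [cur]
  | h :: t => (cur ++ h) :: t

lemma emit_cons (x : List Char) (l : List (List Char)) :
    emit (x :: l) = (if PySem.Chars.strip x ≠ [] then [String.ofList (PySem.Chars.strip x)] else []) ++ emit l := by
  simp only [emit, List.map_cons, List.filter_cons]
  split_ifs with h1 h2 h3 <;> simp_all

lemma prependHead_consHead (cur : List Char) (c : Char) (l : List (List Char)) :
    prependHead cur (consHead c l) = prependHead (cur ++ [c]) l := by
  cases l <;> simp [prependHead, consHead]

def finishA (st : List String × List Char × Int) : List String :=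
  if PySem.Chars.strip st.2.1 ≠ [] then st.1 ++ [String.ofList (PySem.Chars.strip st.2.1)] else st.1

lemma rawSplit_ne_nil (d : Int) (cs : List Char) : rawSplit d cs ≠ [] := by
  cases cs <;> simp [rawSplit] <;> split_ifs <;> (first | simp | (cases h : rawSplit _ _ <;> simp [consHead]))

lemma lemA (cs : List Char) : ∀ (d : Int) (tokens : List String) (current : List Char),
    finishA (cs.foldl tokAStep (tokens, current, d)) = tokens ++ emit (prependHead current (rawSplit d cs)) := by
  induction cs with
  | nil =>
    intro d tokens current
    simp only [List.foldl_nil, finishA, rawSplit, prependHead, List.append_nil, emit_cons]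
    split_ifs <;> simp [emit]
  | cons c cs ih =>
    intro d tokens current
    simp only [List.foldl_cons, rawSplit, tokAStep]
    split_ifs with h1 h2 h3 h4
    · rw [ih, prependHead_consHead]
    · rw [ih, prependHead_consHead]
    · rw [ih]
      cases hr : rawSplit d cs with
      | nil => exact absurd hr (rawSplit_ne_nil d cs)
      | cons h t =>
        simp only [prependHead, List.nil_append, List.append_nil, emit_cons]
        simp [h4]
    · rw [ih]
      cases hr : rawSplit d cs with
      | nil => exact absurd hr (rawSplit_ne_nil d cs)
      | cons h t =>
        simp only [prependHead, List.nil_append, List.append_nil, emit_cons]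
        simp [h4]
    · rw [ih, prependHead_consHead]

lemma tokA_eq_emit (s : String) : tokenize_at_depth_0_py s = emit (rawSplit 0 s.toList) := by
  have := lemA s.toList 0 [] []
  simp only [finishA] at this
  rw [tokenize_at_depth_0_py, this]
  cases hr : rawSplit 0 s.toList with
  | nil => exact absurd hr (rawSplit_ne_nil 0 s.toList)
  | cons h t => simp [prependHead]

-- B side
def bndsN : List Char → Nat → Int → List Nat
  | [], _, _ => []
  | c :: cs, i, d =>
    if c = '(' then bndsN cs (i + 1) (d + 1)
    else if c = ')' then bndsN cs (i + 1) (d - 1)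
    else if c = ' ' ∧ d = 0 then i :: bndsN cs (i + 1) d
    else bndsN cs (i + 1) d

lemma lemB1 (cs : List Char) : ∀ (i : Nat) (d : Int) (bs : List Int),
    ((PySem.List.enumerate cs (i : Int)).foldl bStep (d, bs)).2 = bs ++ (bndsN cs i d).map (fun n : Nat => (n : Int)) := by
  induction cs with
  | nil => intro i d bs; simp [PySem.List.enumerate_nil, bndsN]
  | cons c cs ih =>
    intro i d bs
    rw [PySem.List.enumerate_cons]
    simp only [List.foldl_cons, bStep, bndsN]
    have hi : (i : Int) + 1 = ((i + 1 : Nat) : Int) := by push_cast; ring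
    split_ifs with h1 h2 h3 <;> simp only [hi, ih] <;> simp

def segsRecN (full : List Char) : Nat → List Nat → List (List Char)
  | _, [] => []
  | prev, b :: bs => PySem.List.slice full (some (prev : Int)) (some (b : Int)) :: segsRecN full (b + 1) bs

lemma lemB2 (full : List Char) (l : List Nat) : ∀ (acc : List (List Char)) (prev : Nat),
    ((l.map (fun n : Nat => (n : Int))).foldl (sStep full) (acc, (prev : Int))).1 = acc ++ segsRecN full prev l := by
  induction l with
  | nil => intro acc prev; simp [segsRecN]
  | cons b bs ih =>
    intro acc prev
    simp only [List.map_cons, List.foldl_cons, sStep, segsRecN]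
    have hb : (b : Int) + 1 = ((b + 1 : Nat) : Int) := by push_cast; ring
    rw [hb, ih]
    simp

lemma bndsN_ge (cs : List Char) : ∀ (i : Nat) (d : Int), ∀ n ∈ bndsN cs i d, i ≤ n := by
  induction cs with
  | nil => intro i d n hn; simp [bndsN] at hn
  | cons c cs ih =>
    intro i d n hn
    simp only [bndsN] at hn
    split_ifs at hn with h1 h2 h3
    · exact le_trans (by omega) (ih (i+1) (d+1) n hn)
    · exact le_trans (by omega) (ih (i+1) (d-1) n hn)
    · rcases List.mem_cons.mp hn with h | h
      · omega
      · exact le_trans (by omega) (ih (i+1) d n h)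
    · exact le_trans (by omega) (ih (i+1) d n hn)

lemma slice_cons_of_lt (full : List Char) (i m : Nat) (c : Char) (rest : List Char)
    (h : full.drop i = c :: rest) (him : i + 1 ≤ m) :
    PySem.List.slice full (some (i : Int)) (some (m : Int)) =
      c :: PySem.List.slice full (some ((i + 1 : Nat) : Int)) (some (m : Int)) := by
  rw [PySem.List.slice_natCast, PySem.List.slice_natCast, h]
  have hd : full.drop (i + 1) = rest := by
    rw [← List.tail_drop, h]; rfl
  rw [hd]
  have : m - i = (m - (i + 1)) + 1 := by omega
  rw [this, List.take_succ_cons]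

lemma segsRecN_shift (full : List Char) (c : Char) (rest : List Char) (i : Nat)
    (h : full.drop i = c :: rest) (ns : List Nat) (hne : ns ≠ []) (hge : ∀ n ∈ ns, i + 1 ≤ n) :
    segsRecN full i ns = consHead c (segsRecN full (i + 1) ns) := by
  cases ns with
  | nil => exact absurd rfl hne
  | cons b bs =>
    simp only [segsRecN, consHead]
    rw [slice_cons_of_lt full i b c rest h (hge b (List.mem_cons_self ..))]

lemma lemB3 (cs : List Char) : ∀ (full : List Char) (i : Nat) (d : Int), full.drop i = cs →
    segsRecN full i (bndsN cs i d ++ [full.length]) = rawSplit d cs := by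
  induction cs with
  | nil =>
    intro full i d h
    simp only [bndsN, List.nil_append, segsRecN, rawSplit]
    rw [PySem.List.slice_natCast]
    rw [h]
    simp
  | cons c cs ih =>
    intro full i d h
    have hd : full.drop (i + 1) = cs := by
      rw [← List.tail_drop, h]; rfl
    have hlen : i + 1 ≤ full.length := by
      have : (full.drop i).length = full.length - i := List.length_drop ..
      rw [h] at this; simp at this; omega
    simp only [bndsN, rawSplit]
    split_ifs with h1 h2 h3
    · rw [segsRecN_shift full c cs i h _ (by simp) ?_, ih full (i+1) (d+1) hd]
      intro n hn
      rcases List.mem_append.mp hn with hn | hn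
      · exact bndsN_ge cs (i+1) (d+1) n hn
      · simp at hn; omega
    · rw [segsRecN_shift full c cs i h _ (by simp) ?_, ih full (i+1) (d-1) hd]
      intro n hn
      rcases List.mem_append.mp hn with hn | hn
      · exact bndsN_ge cs (i+1) (d-1) n hn
      · simp at hn; omega
    · simp only [List.cons_append, segsRecN]
      rw [PySem.List.slice_natCast]
      simp only [Nat.sub_self, List.take_zero]
      rw [ih full (i+1) d hd]
    · rw [segsRecN_shift full c cs i h _ (by simp) ?_, ih full (i+1) d hd]
      intro n hn
      rcases List.mem_append.mp hn with hn | hn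
      · exact bndsN_ge cs (i+1) d n hn
      · simp at hn; omega

lemma tokB_eq_emit (s : String) : tokenize_at_depth_0_py_alt s = emit (rawSplit 0 s.toList) := by
  have h1 := lemB1 s.toList 0 0 []
  have h2 := lemB2 s.toList (bndsN s.toList 0 0 ++ [s.toList.length]) [] 0
  have h3 := lemB3 s.toList s.toList 0 0 (by simp)
  simp only [Nat.cast_zero, List.nil_append, List.map_append, List.map_cons, List.map_nil] at h1 h2
  simp only [tokenize_at_depth_0_py_alt, h1, h2, h3]
  rfl

-- ===== VERDICT (by name: the statement is the Claim_ definition above) =====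
theorem tokenize_at_depth_0_py_spec : Claim_equal_tokenize_at_depth_0_py := by
  intro s _
  unfold Spec_tokenize_at_depth_0_py
  rw [tokA_eq_emit, tokB_eq_emit]
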